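-- pv_equiv track=rewrite | github.com/PerryHighCS/Presentations | scripts/crop-servo-pwm.py | find_runs
-- ===== SOURCE A (Python) =====
-- def find_runs(values: list[int], max_gap: int) -> list[tuple[int, int]]:
--     if not values:
--         return []
--
--     raw_runs: list[list[int]] = []
--     start = prev = values[0]
--     for value in values[1:]:
--         if value == prev + 1:
--             prev = value
--         else:
--             raw_runs.append([start, prev])
--             start = prev = value
--     raw_runs.append([start, prev])
--
--     merged: list[list[int]] = []
--     for start, end in raw_runs:
--         if not merged or start - merged[-1][1] > max_gap:
--             merged.append([start, end])
--         else:
--             merged[-1][1] = end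
--
--     return [(start, end) for start, end in merged]
-- ===== SOURCE B (Python) =====
-- def find_runs(values: list[int], max_gap: int) -> list[tuple[int, int]]:
--     if not values:
--         return []
--     out: list[tuple[int, int]] = []
--     start = end = values[0]
--     for v in values[1:]:
--         if v == end + 1 or v - end <= max_gap:
--             end = v
--         else:
--             out.append((start, end))
--             start = end = v
--     out.append((start, end))
--     return out
-- ===== Notes on version B (the rewrite author's own statement) =====
-- stated objective: simpler
-- what changed: Fuses A's two passes (build raw consecutive runs, then merge within max_gap) into one linear scan that maintains only the current output run [start,end], with no intermediate raw_runs list; consecutive extension (v == end+1) and gap merging (v - end <= max_gap) are decided per element.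
import Mathlib
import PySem

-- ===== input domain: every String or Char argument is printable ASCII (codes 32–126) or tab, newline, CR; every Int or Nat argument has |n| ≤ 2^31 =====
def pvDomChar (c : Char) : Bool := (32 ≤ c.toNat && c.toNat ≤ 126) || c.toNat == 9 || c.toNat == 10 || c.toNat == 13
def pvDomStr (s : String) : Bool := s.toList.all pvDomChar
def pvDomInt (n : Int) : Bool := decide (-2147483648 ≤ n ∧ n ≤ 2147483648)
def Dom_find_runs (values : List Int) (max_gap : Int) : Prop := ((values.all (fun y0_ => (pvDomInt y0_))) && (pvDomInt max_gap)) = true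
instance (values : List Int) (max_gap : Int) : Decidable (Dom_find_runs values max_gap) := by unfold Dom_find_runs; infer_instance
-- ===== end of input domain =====

-- B fuses A's two passes (raw consecutive runs, then gap-merge) into one scan keeping only the
-- current output run; same return value, no intermediate raw_runs list (objective: simpler).

-- ===== PORT A =====
-- step of A's first loop: state (raw_runs, start, prev)
def stepRawA (acc : List (Int × Int) × Int × Int) (value : Int) : List (Int × Int) × Int × Int :=
  if value = acc.2.2 + 1 then (acc.1, acc.2.1, value)
  else (acc.1 ++ [(acc.2.1, acc.2.2)], value, value)

-- step of A's merge loop: 'if not merged or start - merged[-1][1] > max_gap' append, else mutate last end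
def stepMergeA (max_gap : Int) (merged : List (Int × Int)) (run : Int × Int) : List (Int × Int) :=
  match merged.getLast? with
  | none => merged ++ [run]
  | some last =>
      if run.1 - last.2 > max_gap then merged ++ [run]
      else merged.dropLast ++ [(last.1, run.2)]

def find_runs (values : List Int) (max_gap : Int) : List (Int × Int) :=
  match values with
  | [] => []
  | v0 :: rest =>
    let st := rest.foldl stepRawA ([], v0, v0)
    let raw_runs := st.1 ++ [(st.2.1, st.2.2)]
    let merged := raw_runs.foldl (stepMergeA max_gap) []
    merged.map (fun r => (r.1, r.2))

-- ===== PORT B =====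
-- step of B's single loop: state (out, start, end)
def stepB (max_gap : Int) (acc : List (Int × Int) × Int × Int) (v : Int) : List (Int × Int) × Int × Int :=
  if v = acc.2.2 + 1 then (acc.1, acc.2.1, v)
  else if v - acc.2.2 ≤ max_gap then (acc.1, acc.2.1, v)
  else (acc.1 ++ [(acc.2.1, acc.2.2)], v, v)

def find_runs_alt (values : List Int) (max_gap : Int) : List (Int × Int) :=
  match values with
  | [] => []
  | v0 :: rest =>
    let st := rest.foldl (stepB max_gap) ([], v0, v0)
    st.1 ++ [(st.2.1, st.2.2)]

-- ===== PRECONDITION & SPEC =====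
def Spec_find_runs (values : List Int) (max_gap : Int) (out : List (Int × Int)) : Prop := out = find_runs_alt values max_gap
instance (values : List Int) (max_gap : Int) (out : List (Int × Int)) : Decidable (Spec_find_runs values max_gap out) := by unfold Spec_find_runs; infer_instance

-- ===== CLAIM (what is proved, stated in full; the proofs are below) =====
def Claim_equal_find_runs : Prop := ∀ (values : List Int) (max_gap : Int), Dom_find_runs values max_gap → Spec_find_runs values max_gap (find_runs values max_gap)

-- ===== LEMMAS AND PROOFS =====

-- the raw consecutive runs A's first loop produces from `rest`, current run (s, p)
def runsOf (rest : List Int) (s p : Int) : List (Int × Int) :=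
  match rest with
  | [] => [(s, p)]
  | v :: vs => if v = p + 1 then runsOf vs s v else (s, p) :: runsOf vs v v

theorem rawA_eq_runsOf (rest : List Int) :
    ∀ (s p : Int) (raw0 : List (Int × Int)),
      (let st := rest.foldl stepRawA (raw0, s, p); st.1 ++ [(st.2.1, st.2.2)])
        = raw0 ++ runsOf rest s p := by
  induction rest with
  | nil => intro s p raw0; simp [runsOf]
  | cons v vs ih =>
      intro s p raw0
      by_cases h : v = p + 1
      · simp [runsOf, stepRawA, h, ih]
      · simp [runsOf, stepRawA, h, ih]

-- merging A's runs starting from a state whose last merged run is (cs, pe) equals B's scan,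
-- where the decision for the pending run's start s against pe is made up front
theorem merge_runsOf_snoc (max_gap : Int) (rest : List Int) :
    ∀ (s p cs pe : Int) (out : List (Int × Int)),
      (runsOf rest s p).foldl (stepMergeA max_gap) (out ++ [(cs, pe)])
        = (let st := rest.foldl (stepB max_gap)
              (if s - pe > max_gap then (out ++ [(cs, pe)], s, p) else (out, cs, p));
           st.1 ++ [(st.2.1, st.2.2)]) := by
  induction rest with
  | nil =>
      intro s p cs pe out
      by_cases h : s - pe > max_gap
      · simp [runsOf, stepMergeA, h]
      · simp [runsOf, stepMergeA, h]
  | cons v vs ih =>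
      intro s p cs pe out
      by_cases h : v = p + 1
      · by_cases hg : s - pe > max_gap
        · simpa [runsOf, h, hg, stepB] using ih s v cs pe out
        · simpa [runsOf, h, hg, stepB] using ih s v cs pe out
      · by_cases hg : s - pe > max_gap
        · by_cases hv : v - p ≤ max_gap
          · simpa [runsOf, h, hg, hv, stepB, stepMergeA, not_lt.mpr hv]
              using ih v v s p (out ++ [(cs, pe)])
          · simpa [runsOf, h, hg, hv, stepB, stepMergeA, not_le.mp hv]
              using ih v v s p (out ++ [(cs, pe)])
        · by_cases hv : v - p ≤ max_gap
          · simpa [runsOf, h, hg, hv, stepB, stepMergeA, not_lt.mpr hv]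
              using ih v v cs p out
          · simpa [runsOf, h, hg, hv, stepB, stepMergeA, not_le.mp hv]
              using ih v v cs p out

-- merging A's runs from the empty merged list equals B's scan from the same state
theorem merge_runsOf_nil (max_gap : Int) (rest : List Int) :
    ∀ (s p : Int),
      (runsOf rest s p).foldl (stepMergeA max_gap) []
        = (let st := rest.foldl (stepB max_gap) ([], s, p); st.1 ++ [(st.2.1, st.2.2)]) := by
  induction rest with
  | nil => intro s p; simp [runsOf, stepMergeA]
  | cons v vs ih =>
      intro s p
      by_cases h : v = p + 1
      · simpa [runsOf, h, stepB] using ih s v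
      · by_cases hv : v - p ≤ max_gap
        · simpa [runsOf, h, hv, stepB, stepMergeA, not_lt.mpr hv]
            using merge_runsOf_snoc max_gap vs v v s p []
        · simpa [runsOf, h, hv, stepB, stepMergeA, not_le.mp hv]
            using merge_runsOf_snoc max_gap vs v v s p []

-- ===== VERDICT (by name: the statement is the Claim_ definition above) =====
theorem find_runs_spec : Claim_equal_find_runs := by
  intro values max_gap _
  unfold Spec_find_runs
  cases values with
  | nil => rfl
  | cons v0 rest =>
      simp only [find_runs, find_runs_alt]
      rw [show (rest.foldl stepRawA ([], v0, v0)).1 ++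
            [((rest.foldl stepRawA ([], v0, v0)).2.1, (rest.foldl stepRawA ([], v0, v0)).2.2)]
            = runsOf rest v0 v0 from by simpa using rawA_eq_runsOf rest v0 v0 []]
      rw [merge_runsOf_nil max_gap rest v0 v0]
      simp
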